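-- pv_equiv track=rewrite | github.com/BryanLauw/postgreysiaSQL | Query Optimizer/QueryHelper.py | extract_FROM
-- ===== SOURCE A (Python) =====
-- def extract_FROM(values: str):
--     """
--     Extract FROM clause and split by JOIN operations.
--     Returns a list of tables and JOIN expressions.
--     """
--     arr_joins = []
--     values_parsed = values.split()
--     element = ""
--     i = 0
--     while i < len(values_parsed):
--         if values_parsed[i] == "JOIN":
--             if element:
--                 arr_joins.append(element.strip())
--             arr_joins.append("JOIN")
--             element = ""
--         else:
--             element += " " + values_parsed[i]
--         i += 1
--
--     if element:
--         arr_joins.append(element.strip())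
--
--     return arr_joins
-- ===== SOURCE B (Python) =====
-- from itertools import groupby
--
-- def extract_FROM(values: str):
--     """
--     Extract FROM clause and split by JOIN operations.
--     Returns a list of tables and JOIN expressions.
--     """
--     result = []
--     for is_join, group in groupby(values.split(), key=lambda tok: tok == "JOIN"):
--         tokens = list(group)
--         if is_join:
--             result.extend(["JOIN"] * len(tokens))
--         else:
--             result.append(" ".join(tokens))
--     return result
-- ===== Notes on version B (the rewrite author's own statement) =====
-- stated objective: alternative
-- what changed: Replaces A's incremental per-token string-accumulator loop with a group-then-join pass: split once, cluster consecutive tokens with itertools.groupby keyed on being the JOIN keyword, emit one JOIN entry per token of a JOIN run and a space-joined segment for each other run.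
import Mathlib
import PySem

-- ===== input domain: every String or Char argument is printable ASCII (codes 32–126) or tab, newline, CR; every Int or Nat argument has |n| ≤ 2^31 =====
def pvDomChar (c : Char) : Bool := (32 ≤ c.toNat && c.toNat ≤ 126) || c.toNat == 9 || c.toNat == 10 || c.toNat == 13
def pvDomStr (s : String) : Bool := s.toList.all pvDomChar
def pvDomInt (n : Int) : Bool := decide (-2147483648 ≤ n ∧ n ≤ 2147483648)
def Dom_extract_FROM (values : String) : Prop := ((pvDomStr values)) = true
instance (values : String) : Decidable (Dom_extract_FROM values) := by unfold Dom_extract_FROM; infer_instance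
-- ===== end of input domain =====

-- B replaces A's incremental '+='-accumulator loop by a group-then-join pass: split once,
-- cluster consecutive tokens by whether they are the JOIN keyword, emit each cluster at once (objective: alternative).

-- ===== PORT A =====
-- A's `element` (a Python str grown token by token) is modelled as a List Char per the
-- string convention; element.strip() is PySem.Chars.strip.
def extract_FROM (values : String) : List String :=
  let values_parsed := PySem.Str.split₀ values
  let st := values_parsed.foldl
    (fun (st : List String × List Char) tok =>
      if tok == "JOIN" then
        ((if st.2 ≠ [] then st.1 ++ [String.ofList (PySem.Chars.strip st.2)] else st.1) ++ ["JOIN"],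
         ([] : List Char))
      else (st.1, st.2 ++ (' ' :: tok.toList)))
    ([], ([] : List Char))
  if st.2 ≠ [] then st.1 ++ [String.ofList (PySem.Chars.strip st.2)] else st.1

-- ===== PORT B =====
-- itertools.groupby with key (tok == "JOIN"): runs of consecutive tokens with equal key.
def pvGroupRuns : List String → List (Bool × List String)
  | [] => []
  | t :: ts =>
    match pvGroupRuns ts with
    | [] => [((t == "JOIN"), [t])]
    | (b, g) :: rest =>
      if (t == "JOIN") == b then (b, t :: g) :: rest
      else ((t == "JOIN"), [t]) :: (b, g) :: rest

def extract_FROM_alt (values : String) : List String :=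
  (pvGroupRuns (PySem.Str.split₀ values)).flatMap
    (fun grp => if grp.1 then grp.2.map (fun _ => "JOIN") else [PySem.Str.join " " grp.2])

-- ===== PRECONDITION & SPEC =====
def Spec_extract_FROM (values : String) (out : List String) : Prop := out = extract_FROM_alt values
instance (values : String) (out : List String) : Decidable (Spec_extract_FROM values out) := by unfold Spec_extract_FROM; infer_instance

-- ===== CLAIM (what is proved, stated in full; the proofs are below) =====
def Claim_equal_extract_FROM : Prop := ∀ (values : String), Dom_extract_FROM values → Spec_extract_FROM values (extract_FROM values)

-- ===== LEMMAS AND PROOFS =====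

-- a token of split₀: nonempty, all characters non-whitespace
def pvGood (w : String) : Prop := w.toList ≠ [] ∧ ∀ c ∈ w.toList, PySem.Chars.isspace c = false

lemma pv_split₀_go_good (s : List Char) : ∀ (cur : List Char) (acc : List (List Char)),
    (∀ c ∈ cur, PySem.Chars.isspace c = false) →
    (∀ w ∈ acc, w ≠ [] ∧ ∀ c ∈ w, PySem.Chars.isspace c = false) →
    ∀ w ∈ PySem.Chars.split₀.go s cur acc, w ≠ [] ∧ ∀ c ∈ w, PySem.Chars.isspace c = false := by
  induction s with
  | nil =>
    intro cur acc hcur hacc w hw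
    simp only [PySem.Chars.split₀.go] at hw
    by_cases hc : cur.isEmpty
    · rw [if_pos hc, List.mem_reverse] at hw
      exact hacc w hw
    · rw [if_neg hc, List.mem_reverse] at hw
      rcases List.mem_cons.mp hw with h | h
      · subst h
        refine ⟨by simpa using (by simpa [List.isEmpty_iff] using hc), ?_⟩
        intro c hcmem
        exact hcur c (List.mem_reverse.mp hcmem)
      · exact hacc w h
  | cons c rest ih =>
    intro cur acc hcur hacc w hw
    simp only [PySem.Chars.split₀.go] at hw
    by_cases hsp : PySem.Chars.isspace c = true
    · rw [if_pos hsp] at hw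
      by_cases hc : cur.isEmpty
      · rw [if_pos hc] at hw
        exact ih [] acc (by simp) hacc w hw
      · rw [if_neg hc] at hw
        refine ih [] (cur.reverse :: acc) (by simp) ?_ w hw
        intro v hv
        rcases List.mem_cons.mp hv with h | h
        · subst h
          exact ⟨by simpa using (by simpa [List.isEmpty_iff] using hc),
            fun d hd => hcur d (List.mem_reverse.mp hd)⟩
        · exact hacc v h
    · rw [if_neg hsp] at hw
      refine ih (c :: cur) acc ?_ hacc w hw
      intro d hd
      rcases List.mem_cons.mp hd with h | h
      · subst h; simpa using hsp
      · exact hcur d h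

lemma pv_split₀_good (values : String) : ∀ w ∈ PySem.Str.split₀ values, pvGood w := by
  intro w hw
  have hmem : w.toList ∈ PySem.Chars.split₀ values.toList := by
    rw [← PySem.Str.split₀_map_toList]
    exact List.mem_map_of_mem hw
  exact pv_split₀_go_good values.toList [] [] (by simp) (by simp) w.toList hmem

-- pieces of A's loop, for the characterization proof
def pvEmit (el : List Char) : List String :=
  if el ≠ [] then [String.ofList (PySem.Chars.strip el)] else []

def pvProcA : List Char → List String → List String
  | el, [] => pvEmit el
  | el, t :: ts =>
    if t == "JOIN" then pvEmit el ++ "JOIN" :: pvProcA [] ts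
    else pvProcA (el ++ (' ' :: t.toList)) ts

lemma pv_foldA (ts : List String) : ∀ (arr : List String) (el : List Char),
    (let st := ts.foldl
      (fun (st : List String × List Char) tok =>
        if tok == "JOIN" then
          ((if st.2 ≠ [] then st.1 ++ [String.ofList (PySem.Chars.strip st.2)] else st.1) ++ ["JOIN"],
           ([] : List Char))
        else (st.1, st.2 ++ (' ' :: tok.toList))) (arr, el)
     if st.2 ≠ [] then st.1 ++ [String.ofList (PySem.Chars.strip st.2)] else st.1)
    = arr ++ pvProcA el ts := by
  induction ts with
  | nil =>
    intro arr el
    simp only [List.foldl_nil, pvProcA, pvEmit]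
    split_ifs <;> simp
  | cons t ts ih =>
    intro arr el
    simp only [List.foldl_cons]
    by_cases ht : (t == "JOIN") = true
    · simp only [ht, if_true, pvProcA, ih]
      by_cases hel : el = [] <;> simp [pvEmit, hel]
    · simp only [ht, if_false, pvProcA, ih, Bool.false_eq_true]

-- the pending element after accumulating the words ws
def pvPend (ws : List String) : List Char :=
  (ws.map (fun w => ' ' :: w.toList)).flatten

def pvOut (ts : List String) : List String :=
  (pvGroupRuns ts).flatMap
    (fun grp => if grp.1 then grp.2.map (fun _ => "JOIN") else [PySem.Str.join " " grp.2])

lemma pv_strip_space_cons (j : List Char)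
    (h1 : ∀ c, j.head? = some c → PySem.Chars.isspace c = false)
    (h2 : ∀ c, j.getLast? = some c → PySem.Chars.isspace c = false) :
    PySem.Chars.strip (' ' :: j) = j := by
  have hsp : PySem.Chars.isspace ' ' = true := by decide
  unfold PySem.Chars.strip PySem.Chars.lstrip PySem.Chars.rstrip
  rw [List.dropWhile_cons_of_pos hsp]
  have hd : List.dropWhile PySem.Chars.isspace j = j := by
    cases j with
    | nil => simp
    | cons c j' => exact List.dropWhile_cons_of_neg (by simp [h1 c rfl])
  rw [hd]
  have hr : List.dropWhile PySem.Chars.isspace j.reverse = j.reverse := by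
    cases hj : j.reverse with
    | nil => simp
    | cons c j' =>
      have : j.getLast? = some c := by
        rw [← List.head?_reverse, hj]; rfl
      exact List.dropWhile_cons_of_neg (by simp [h2 c this])
  rw [hr, List.reverse_reverse]

lemma pv_join_pend (ws : List String) (w : String) :
    PySem.Chars.join [' '] ((w :: ws).map String.toList) = w.toList ++ pvPend ws := by
  induction ws generalizing w with
  | nil => simp [PySem.Chars.join_singleton, pvPend]
  | cons v ws ih =>
    rw [List.map_cons, List.map_cons, PySem.Chars.join_cons_cons, ← List.map_cons, ih v]
    simp [pvPend]

lemma pv_pend_getLast (ws : List String) (w : String) (hw : pvGood w)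
    (hws : ∀ v ∈ ws, pvGood v) :
    ∀ c, (w.toList ++ pvPend ws).getLast? = some c → PySem.Chars.isspace c = false := by
  induction ws generalizing w with
  | nil =>
    intro c hc
    simp only [pvPend, List.map_nil, List.flatten_nil, List.append_nil] at hc
    exact hw.2 c (List.mem_of_getLast? hc)
  | cons v ws ih =>
    intro c hc
    have hvne : (v.toList ++ pvPend ws) ≠ [] := by
      have := (hws v (by simp)).1
      intro h; exact this (List.append_eq_nil_iff.mp h).1
    have : (w.toList ++ pvPend (v :: ws)).getLast? = (v.toList ++ pvPend ws).getLast? := by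
      have hpend : pvPend (v :: ws) = ' ' :: (v.toList ++ pvPend ws) := by simp [pvPend]
      rw [hpend]
      obtain ⟨x, hx⟩ := Option.isSome_iff_exists.mp (List.getLast?_isSome.mpr hvne)
      have hcons : (' ' :: (v.toList ++ pvPend ws)).getLast? = some x := by
        rw [show (' ' :: (v.toList ++ pvPend ws)) = [' '] ++ (v.toList ++ pvPend ws) from rfl,
          List.getLast?_append, hx]
        rfl
      rw [List.getLast?_append, hcons, hx]
      rfl
    rw [this] at hc
    exact ih v (hws v (by simp)) (fun u hu => hws u (by simp [hu])) c hc

lemma pv_emit_pend (w : String) (ws : List String) (hw : pvGood w) (hws : ∀ v ∈ ws, pvGood v) :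
    pvEmit (pvPend (w :: ws)) = [PySem.Str.join " " (w :: ws)] := by
  have hj : pvPend (w :: ws) = ' ' :: (w.toList ++ pvPend ws) := by simp [pvPend]
  have h1 : ∀ c, (w.toList ++ pvPend ws).head? = some c → PySem.Chars.isspace c = false := by
    intro c hc
    cases hwl : w.toList with
    | nil => exact absurd hwl hw.1
    | cons a l =>
      rw [hwl] at hc
      simp only [List.cons_append, List.head?_cons, Option.some.injEq] at hc
      subst hc
      exact hw.2 _ (by rw [hwl]; exact List.mem_cons_self)
  rw [pvEmit, hj, if_pos (by simp)]
  rw [pv_strip_space_cons _ h1 (pv_pend_getLast ws w hw hws), ← pv_join_pend]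
  rw [show ([' '] : List Char) = " ".toList from rfl, ← PySem.Str.toList_join, String.ofList_toList]

lemma pv_groupRuns_cons_shape (t : String) (ts : List String) :
    ∃ g rest, pvGroupRuns (t :: ts) = ((t == "JOIN"), t :: g) :: rest := by
  simp only [pvGroupRuns]
  rcases h : pvGroupRuns ts with _ | ⟨⟨b, g⟩, rest⟩
  · exact ⟨[], [], rfl⟩
  · by_cases hb : (t == "JOIN") = b
    · subst hb; exact ⟨g, rest, by simp⟩
    · refine ⟨[], (b, g) :: rest, ?_⟩
      simp [hb]

lemma pv_groupRuns_all_false (ws : List String) (h : ∀ w ∈ ws, (w == "JOIN") = false)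
    (hne : ws ≠ []) : pvGroupRuns ws = [(false, ws)] := by
  induction ws with
  | nil => exact absurd rfl hne
  | cons w ws ih =>
    by_cases hws : ws = []
    · subst hws; simp [pvGroupRuns, h w (by simp)]
    · rw [pvGroupRuns, ih (fun v hv => h v (List.mem_cons_of_mem _ hv)) hws]
      simp [h w (by simp)]

lemma pv_groupRuns_append_join (ws : List String) (ts : List String)
    (h : ∀ w ∈ ws, (w == "JOIN") = false) (hne : ws ≠ []) :
    pvGroupRuns (ws ++ "JOIN" :: ts) = (false, ws) :: pvGroupRuns ("JOIN" :: ts) := by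
  induction ws with
  | nil => exact absurd rfl hne
  | cons w ws ih =>
    by_cases hws : ws = []
    · subst hws
      obtain ⟨g, rest, hgr⟩ := pv_groupRuns_cons_shape "JOIN" ts
      rw [List.singleton_append, pvGroupRuns, hgr]
      simp [h w (by simp)]
    · rw [List.cons_append, pvGroupRuns, ih (fun v hv => h v (List.mem_cons_of_mem _ hv)) hws]
      simp [h w (by simp)]

lemma pv_out_join_cons (ts : List String) : pvOut ("JOIN" :: ts) = "JOIN" :: pvOut ts := by
  unfold pvOut
  rw [pvGroupRuns]
  rcases h : pvGroupRuns ts with _ | ⟨⟨b, g⟩, rest⟩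
  · simp
  · cases b <;> simp [List.replicate_succ]

lemma pv_main (ts : List String) (hts : ∀ w ∈ ts, pvGood w) :
    ∀ ws : List String, (∀ w ∈ ws, pvGood w ∧ (w == "JOIN") = false) →
    pvProcA (pvPend ws) ts = pvOut (ws ++ ts) := by
  induction ts with
  | nil =>
    intro ws hws
    cases ws with
    | nil => simp [pvProcA, pvPend, pvEmit, pvOut, pvGroupRuns]
    | cons w ws' =>
      rw [pvProcA, pv_emit_pend w ws' (hws w (by simp)).1 (fun v hv => (hws v (by simp [hv])).1)]
      rw [List.append_nil, pvOut,
        pv_groupRuns_all_false _ (fun v hv => (hws v hv).2) (by simp)]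
      simp
  | cons t ts ih =>
    intro ws hws
    have hts' : ∀ w ∈ ts, pvGood w := fun w hw => hts w (by simp [hw])
    by_cases ht : (t == "JOIN") = true
    · have hteq : t = "JOIN" := by simpa using ht
      rw [pvProcA, if_pos ht]
      have hnil := ih hts' [] (by simp)
      simp only [pvPend, List.map_nil, List.flatten_nil, List.nil_append] at hnil
      rw [hnil]
      cases ws with
      | nil => simp [pvEmit, pvPend, hteq, pv_out_join_cons]
      | cons w ws' =>
        rw [pv_emit_pend w ws' (hws w (by simp)).1 (fun v hv => (hws v (by simp [hv])).1)]
        rw [hteq]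
        have hgr := pv_groupRuns_append_join (w :: ws') ts (fun v hv => (hws v hv).2) (by simp)
        have h2 := pv_out_join_cons ts
        simp only [pvOut] at h2 ⊢
        rw [hgr, List.flatMap_cons, h2]
        simp
    · rw [pvProcA, if_neg ht]
      have hpend : pvPend ws ++ (' ' :: t.toList) = pvPend (ws ++ [t]) := by
        simp [pvPend]
      rw [hpend, ih hts' (ws ++ [t]) ?side]
      · rw [List.append_assoc]; rfl
      case side =>
        intro v hv
        rcases List.mem_append.mp hv with h | h
        · exact hws v h
        · have : v = t := by simpa using h
          subst this
          exact ⟨hts v (by simp), by simpa using ht⟩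

-- ===== VERDICT (by name: the statement is the Claim_ definition above) =====
theorem extract_FROM_spec : Claim_equal_extract_FROM := by
  intro values _
  unfold Spec_extract_FROM extract_FROM extract_FROM_alt
  have h1 := pv_foldA (PySem.Str.split₀ values) [] []
  simp only at h1 ⊢
  rw [h1, List.nil_append]
  have h2 := pv_main (PySem.Str.split₀ values) (pv_split₀_good values) [] (by simp)
  simpa [pvPend, pvOut] using h2
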